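-- pv_equiv track=rewrite | github.com/Sinnickle/impostor-game | app.py | normalize_vote_choice
-- ===== SOURCE A (Python) =====
-- def sanitize_phrase(phrase):
--     if phrase is None:
--         return ""
--     return " ".join(str(phrase).strip().split())
--
-- def normalize_vote_choice(raw_text, valid_choices):
--     if not raw_text:
--         return None
--
--     cleaned = sanitize_phrase(raw_text).strip()
--     lowered = cleaned.lower()
--
--     for choice in valid_choices:
--         if lowered == choice.lower():
--             return choice
--
--     for choice in valid_choices:
--         if choice.lower() in lowered:
--             return choice
--
--     return None
-- ===== SOURCE B (Python) =====
-- def normalize_vote_choice(raw_text, valid_choices):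
--     if not raw_text:
--         return None
--     lowered = " ".join(raw_text.strip().split()).strip().lower()
--     candidate = None
--     for choice in valid_choices:
--         cl = choice.lower()
--         if lowered == cl:
--             return choice
--         if candidate is None and cl in lowered:
--             candidate = choice
--     return candidate
-- ===== Notes on version B (the rewrite author's own statement) =====
-- stated objective: alternative
-- what changed: Replaced A's two sequential scans over valid_choices (one for exact matches, one for substring matches) by a single pass that returns immediately on an exact match while maintaining an accumulator holding the first substring-containment candidate, returned after the loop.
import Mathlib
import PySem

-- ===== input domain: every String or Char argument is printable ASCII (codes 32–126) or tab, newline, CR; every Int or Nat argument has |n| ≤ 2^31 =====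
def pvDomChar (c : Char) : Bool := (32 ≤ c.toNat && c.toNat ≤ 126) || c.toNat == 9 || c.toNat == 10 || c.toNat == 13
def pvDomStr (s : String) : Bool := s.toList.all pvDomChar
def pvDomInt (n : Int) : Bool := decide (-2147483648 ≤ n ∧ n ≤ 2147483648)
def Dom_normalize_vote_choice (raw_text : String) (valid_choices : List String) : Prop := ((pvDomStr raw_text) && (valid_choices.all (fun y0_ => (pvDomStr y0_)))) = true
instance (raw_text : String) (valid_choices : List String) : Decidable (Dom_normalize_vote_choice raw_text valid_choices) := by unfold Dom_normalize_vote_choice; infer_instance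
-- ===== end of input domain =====

-- ===== PORT A =====
-- One honest line: B merges A's two scans into a single stateful pass with a first-substring-candidate accumulator (alternative decomposition, same cost).
def sanitize_phrase (phrase : String) : String :=
  PySem.Str.join " " (PySem.Str.split₀ (PySem.Str.strip phrase))

def normalize_vote_choice (raw_text : String) (valid_choices : List String) : Option String :=
  if raw_text == "" then none
  else
    let cleaned := PySem.Str.strip (sanitize_phrase raw_text)
    let lowered := PySem.Str.lower cleaned
    match valid_choices.find? (fun choice => lowered == PySem.Str.lower choice) with
    | some choice => some choice
    | none => valid_choices.find? (fun choice => PySem.Str.isIn (PySem.Str.lower choice) lowered)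

-- ===== PORT B =====
def nvcLoop (lowered : String) : List String → Option String → Option String
  | [], candidate => candidate
  | choice :: rest, candidate =>
    let cl := PySem.Str.lower choice
    if lowered == cl then some choice
    else nvcLoop lowered rest
      (if candidate.isNone && PySem.Str.isIn cl lowered then some choice else candidate)

def normalize_vote_choice_alt (raw_text : String) (valid_choices : List String) : Option String :=
  if raw_text == "" then none
  else
    let lowered := PySem.Str.lower (PySem.Str.strip (PySem.Str.join " " (PySem.Str.split₀ (PySem.Str.strip raw_text))))
    nvcLoop lowered valid_choices none

-- ===== PRECONDITION & SPEC =====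
def Spec_normalize_vote_choice (raw_text : String) (valid_choices : List String) (out : Option String) : Prop := out = normalize_vote_choice_alt raw_text valid_choices
instance (raw_text : String) (valid_choices : List String) (out : Option String) : Decidable (Spec_normalize_vote_choice raw_text valid_choices out) := by unfold Spec_normalize_vote_choice; infer_instance

-- ===== CLAIM (what is proved, stated in full; the proofs are below) =====
def Claim_equal_normalize_vote_choice : Prop := ∀ (raw_text : String) (valid_choices : List String), Dom_normalize_vote_choice raw_text valid_choices → Spec_normalize_vote_choice raw_text valid_choices (normalize_vote_choice raw_text valid_choices)

-- ===== LEMMAS AND PROOFS =====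
-- B's single pass equals: first exact match if any, else the recorded candidate orElse the first substring match.
theorem nvcLoop_eq (lowered : String) (cs : List String) (acc : Option String) :
    nvcLoop lowered cs acc =
      match cs.find? (fun choice => lowered == PySem.Str.lower choice) with
      | some choice => some choice
      | none => acc.orElse (fun _ => cs.find? (fun choice => PySem.Str.isIn (PySem.Str.lower choice) lowered)) := by
  induction cs generalizing acc with
  | nil => cases acc <;> simp [nvcLoop, Option.orElse]
  | cons c rest ih =>
    by_cases he : lowered == PySem.Str.lower c
    · simp [nvcLoop, List.find?, he]
    · simp only [nvcLoop, List.find?, he, if_neg, Bool.false_eq_true, not_false_eq_true, ih]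
      cases acc with
      | some a => simp [Option.orElse]
      | none =>
        by_cases hs : PySem.Chars.isIn (PySem.Chars.lower c.toList) lowered.toList = true <;> simp [hs, Option.orElse]

-- ===== VERDICT (by name: the statement is the Claim_ definition above) =====
theorem normalize_vote_choice_spec : Claim_equal_normalize_vote_choice := by
  intro raw_text valid_choices _
  unfold Spec_normalize_vote_choice normalize_vote_choice normalize_vote_choice_alt sanitize_phrase
  by_cases h : raw_text == ""
  · simp [h]
  · simp only [h, if_neg, Bool.false_eq_true, not_false_eq_true, nvcLoop_eq]
    cases valid_choices.find? (fun choice => (PySem.Str.lower (PySem.Str.strip (PySem.Str.join " " (PySem.Str.split₀ (PySem.Str.strip raw_text))))) == PySem.Str.lower choice) <;> rfl
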